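-- pv_equiv track=rewrite | github.com/Yonas-Shapiro/AdventOfCode-2015 | Day-5/Part2.py | checkIfNice
-- ===== SOURCE A (Python) =====
-- def checkIfNice(val):
--     cont = False
--
--     for i in range(len(val)-3):
--         start = val[i] + val[i+1]
--         for j in range(i+2, len(val)-1):
--             end = val[j] + val[j+1]
--             if start == end:
--                 i = len(val)
--                 cont = True
--                 break
--     if not cont:
--         return 0
--
--     for i in range(len(val)-2):
--         if val[i] == val[i+2]:
--             return 1
--
--     return 0
-- ===== SOURCE B (Python) =====
-- def checkIfNice(val):
--     # One pass: remember the first index of each bigram; a bigram seen again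
--     # at distance >= 2 gives the non-overlapping repeated pair.
--     first = {}
--     pair = False
--     for j in range(len(val) - 1):
--         bg = (val[j], val[j + 1])
--         if bg in first:
--             if first[bg] <= j - 2:
--                 pair = True
--                 break
--         else:
--             first[bg] = j
--     if not pair:
--         return 0
--     return 1 if any(val[i] == val[i + 2] for i in range(len(val) - 2)) else 0
-- ===== Notes on version B (the rewrite author's own statement) =====
-- stated objective: faster
-- what changed: Replaces A's nested scan over all bigram pairs with a single pass that hashes each bigram's first index and detects a non-overlapping repeat on the fly.
import Mathlib
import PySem

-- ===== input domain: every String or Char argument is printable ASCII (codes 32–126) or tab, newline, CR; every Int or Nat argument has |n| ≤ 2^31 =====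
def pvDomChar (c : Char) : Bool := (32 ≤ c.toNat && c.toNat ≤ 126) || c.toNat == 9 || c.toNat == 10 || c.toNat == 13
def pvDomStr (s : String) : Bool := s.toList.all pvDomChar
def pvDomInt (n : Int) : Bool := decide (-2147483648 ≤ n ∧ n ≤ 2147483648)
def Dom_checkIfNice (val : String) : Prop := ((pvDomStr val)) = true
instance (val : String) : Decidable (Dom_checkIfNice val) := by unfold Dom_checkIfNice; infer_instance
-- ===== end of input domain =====

-- B replaces A's nested O(n^2) bigram scan with a single pass keeping each bigram's
-- first index in a dict (objective: faster, asymptotic).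

-- ===== PORT A =====
-- A: nested loops; inner loop detects a matching later bigram and breaks, setting cont.
def checkIfNice (val : String) : Int :=
  let l := val.toList
  let n : Int := l.length
  let cont := (PySem.List.pyRange 0 (n - 3) 1).foldl (fun cont i =>
    if (PySem.List.pyRange (i + 2) (n - 1) 1).any (fun j =>
        (PySem.List.pyGet? l i, PySem.List.pyGet? l (i + 1)) ==
        (PySem.List.pyGet? l j, PySem.List.pyGet? l (j + 1)))
    then true else cont) false
  if !cont then 0
  else if (PySem.List.pyRange 0 (n - 2) 1).any (fun i =>
      PySem.List.pyGet? l i == PySem.List.pyGet? l (i + 2)) then 1 else 0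

-- ===== PORT B =====
-- B-side helper: the one-pass scan over bigram start indices with the first-index dict;
-- returning true models Python's `pair = True; break`.
def nicePairScan (l : List Char) :
    List Int → PySem.Dict (Option Char × Option Char) Int → Bool
  | [], _ => false
  | j :: js, first =>
    let bg := (PySem.List.pyGet? l j, PySem.List.pyGet? l (j + 1))
    match PySem.Dict.get? first bg with
    | some f => if f ≤ j - 2 then true else nicePairScan l js first
    | none => nicePairScan l js (PySem.Dict.insert first bg j)

def checkIfNice_alt (val : String) : Int :=
  let l := val.toList
  let n : Int := l.length
  if !nicePairScan l (PySem.List.pyRange 0 (n - 1) 1) PySem.Dict.empty then 0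
  else if (PySem.List.pyRange 0 (n - 2) 1).any (fun i =>
      PySem.List.pyGet? l i == PySem.List.pyGet? l (i + 2)) then 1 else 0

-- ===== PRECONDITION & SPEC =====
def Spec_checkIfNice (val : String) (out : Int) : Prop := out = checkIfNice_alt val
instance (val : String) (out : Int) : Decidable (Spec_checkIfNice val out) := by unfold Spec_checkIfNice; infer_instance

-- ===== CLAIM (what is proved, stated in full; the proofs are below) =====
def Claim_equal_checkIfNice : Prop := ∀ (val : String), Dom_checkIfNice val → Spec_checkIfNice val (checkIfNice val)

-- ===== LEMMAS AND PROOFS =====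

-- the bigram starting at nat index m
def bgAt (l : List Char) (m : Nat) : Option Char × Option Char := (l[m]?, l[m + 1]?)

-- the property both loops decide: some bigram repeats without overlap
def HasPair (l : List Char) : Prop :=
  ∃ i j : Nat, i + 2 ≤ j ∧ j + 1 < l.length ∧ bgAt l i = bgAt l j

lemma contA_iff (l : List Char) :
    ((PySem.List.pyRange 0 ((l.length : Int) - 3) 1).foldl (fun cont i =>
      if (PySem.List.pyRange (i + 2) ((l.length : Int) - 1) 1).any (fun j =>
          (PySem.List.pyGet? l i, PySem.List.pyGet? l (i + 1)) ==
          (PySem.List.pyGet? l j, PySem.List.pyGet? l (j + 1)))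
      then true else cont) false) = true ↔ HasPair l := by
  rw [PySem.List.foldl_if_true_eq]
  simp only [Bool.false_or, List.any_eq_true, PySem.List.mem_pyRange_one, beq_iff_eq,
    Prod.mk.injEq]
  constructor
  · rintro ⟨i, ⟨hi0, hi3⟩, j, ⟨hj2, hjn⟩, heq1, heq2⟩
    have hj0 : 0 ≤ j := by omega
    rw [PySem.List.pyGet?_of_nonneg l hi0, PySem.List.pyGet?_of_nonneg l hj0] at heq1
    rw [PySem.List.pyGet?_of_nonneg l (by omega : (0:Int) ≤ i + 1),
      PySem.List.pyGet?_of_nonneg l (by omega : (0:Int) ≤ j + 1)] at heq2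
    refine ⟨i.toNat, j.toNat, by omega, by omega, ?_⟩
    unfold bgAt
    have e1 : (i + 1).toNat = i.toNat + 1 := by omega
    have e2 : (j + 1).toNat = j.toNat + 1 := by omega
    rw [← e1, ← e2]
    exact Prod.ext heq1 heq2
  · rintro ⟨i, j, hij, hjn, heq⟩
    refine ⟨(i : Int), ⟨by positivity, by omega⟩, (j : Int), ⟨by omega, by omega⟩, ?_, ?_⟩
    · have h1 := congrArg Prod.fst heq
      simp only [bgAt] at h1
      rw [PySem.List.pyGet?_natCast, PySem.List.pyGet?_natCast]
      exact h1
    · have h2 := congrArg Prod.snd heq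
      simp only [bgAt] at h2
      have e1 : (i : Int) + 1 = ((i + 1 : Nat) : Int) := by push_cast; ring
      have e2 : (j : Int) + 1 = ((j + 1 : Nat) : Int) := by push_cast; ring
      rw [e1, e2, PySem.List.pyGet?_natCast, PySem.List.pyGet?_natCast]
      exact h2

-- loop invariant for the one-pass scan: d holds the first index of every bigram
-- starting before k, and no valid pair ends before k
lemma scan_inv (l : List Char) (t : Nat) :
    ∀ (k : Nat) (d : PySem.Dict (Option Char × Option Char) Int),
      l.length - 1 - k = t →
      (∀ bg f, d.get? bg = some f →
        ∃ fn : Nat, f = (fn : Int) ∧ fn < k ∧ bgAt l fn = bg ∧ ∀ m < fn, bgAt l m ≠ bg) →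
      (∀ m : Nat, m < k → d.get? (bgAt l m) ≠ none) →
      (∀ i j : Nat, i + 2 ≤ j → j < k → bgAt l i ≠ bgAt l j) →
      (nicePairScan l (PySem.List.pyRange (k : Int) ((l.length : Int) - 1) 1) d = true
        ↔ HasPair l) := by
  induction t with
  | zero =>
    intro k d ht _ _ H2
    rw [PySem.List.pyRange_one_eq_nil (by omega : ((l.length : Int) - 1) ≤ (k : Int))]
    simp only [nicePairScan]
    constructor
    · intro h; exact absurd h (by simp)
    · rintro ⟨i, j, hij, hjn, heq⟩
      exact absurd heq (H2 i j hij (by omega))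
  | succ t ih =>
    intro k d ht H1 H1' H2
    have hk : (k : Int) < (l.length : Int) - 1 := by omega
    rw [PySem.List.pyRange_one_cons hk]
    have ek : (k : Int) + 1 = ((k + 1 : Nat) : Int) := by push_cast; ring
    simp only [nicePairScan, ek, PySem.List.pyGet?_natCast]
    have hbg : (l[k]?, l[k + 1]?) = bgAt l k := rfl
    rw [hbg]
    cases hg : d.get? (bgAt l k) with
    | some f =>
      obtain ⟨fn, rfl, hfk, hfbg, hfmin⟩ := H1 _ _ hg
      by_cases hf : (fn : Int) ≤ (k : Int) - 2
      · simp only [hf, if_pos, true_iff]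
        exact ⟨fn, k, by omega, by omega, hfbg⟩
      · simp only [hf, if_neg, not_false_iff]
        refine ih (k + 1) d (by omega) ?_ ?_ ?_
        · intro bg f' h
          obtain ⟨fn', h1, h2, h3, h4⟩ := H1 bg f' h
          exact ⟨fn', h1, by omega, h3, h4⟩
        · intro m hm
          rcases Nat.lt_succ_iff_lt_or_eq.mp hm with hm' | rfl
          · exact H1' m hm'
          · rw [hg]; exact Option.some_ne_none _
        · intro i j hij hjk heq
          rcases Nat.lt_succ_iff_lt_or_eq.mp hjk with hj' | rfl
          · exact H2 i j hij hj' heq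
          · -- bgAt l i = bgAt l k with i + 2 ≤ k: fn ≤ i and fn + 2 > k, contradiction
            have hfi : fn ≤ i := by
              by_contra hlt
              exact hfmin i (by omega) (heq.trans hfbg.symm ▸ heq)
            omega
    | none =>
      refine ih (k + 1) (d.insert (bgAt l k) (k : Int)) (by omega) ?_ ?_ ?_
      · intro bg f h
        by_cases hbg' : bg = bgAt l k
        · subst hbg'
          rw [PySem.Dict.get?_insert_self] at h
          refine ⟨k, by injection h with h'; omega, by omega, rfl, ?_⟩
          intro m hm hmeq
          exact H1' m hm (by rw [hmeq, hg])
        · rw [PySem.Dict.get?_insert_of_ne d _ hbg'] at h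
          obtain ⟨fn', h1, h2, h3, h4⟩ := H1 bg f h
          exact ⟨fn', h1, by omega, h3, h4⟩
      · intro m hm
        rcases Nat.lt_succ_iff_lt_or_eq.mp hm with hm' | rfl
        · by_cases hbg' : bgAt l m = bgAt l k
          · rw [hbg', PySem.Dict.get?_insert_self]; exact Option.some_ne_none _
          · rw [PySem.Dict.get?_insert_of_ne d _ hbg']; exact H1' m hm'
        · rw [PySem.Dict.get?_insert_self]; exact Option.some_ne_none _
      · intro i j hij hjk heq
        rcases Nat.lt_succ_iff_lt_or_eq.mp hjk with hj' | rfl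
        · exact H2 i j hij hj' heq
        · exact H1' i (by omega) (by rw [heq, hg])

lemma scanB_iff (l : List Char) :
    nicePairScan l (PySem.List.pyRange 0 ((l.length : Int) - 1) 1) PySem.Dict.empty = true
      ↔ HasPair l := by
  have h0 : ((0 : Nat) : Int) = (0 : Int) := rfl
  rw [← h0]
  refine scan_inv l (l.length - 1 - 0) 0 PySem.Dict.empty rfl ?_ ?_ ?_
  · intro bg f h
    simp [pysem] at h
  · intro m hm; omega
  · intro i j _ hj; omega

-- ===== VERDICT (by name: the statement is the Claim_ definition above) =====
theorem checkIfNice_spec : Claim_equal_checkIfNice := by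
  intro val _
  unfold Spec_checkIfNice checkIfNice checkIfNice_alt
  have h := (contA_iff val.toList).trans (scanB_iff val.toList).symm
  rcases Bool.eq_iff_iff.mpr h with h'
  simp only [h']
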